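-- pv_equiv track=rewrite | github.com/pyarchinit/pyarchinit | modules/s3dgraphy/spatial_grouping_manager.py | create_sector_based_groups
-- ===== SOURCE A (Python) =====
-- from typing import Dict, List, Optional, Tuple
-- from collections import defaultdict
--
-- def create_sector_based_groups(us_data: List[Dict]) -> Dict[str, List[str]]:
--     """
--     Create groups based on settore field
--     """
--     sector_groups = defaultdict(list)
--     for us in us_data:
--         settore = us.get('settore', 'Unknown')
--         if settore:
--             us_id = f"{us.get('sito', '')}_{us.get('area', '')}_{us.get('us', '')}"
--             sector_groups[f"Settore {settore}"].append(us_id)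
--     return dict(sector_groups)
-- ===== SOURCE B (Python) =====
-- def create_sector_based_groups(us_data):
--     """Materialize (group_key, us_id) pairs once, then build the dict by a
--     per-distinct-key scan (dict.fromkeys keeps first-occurrence order)."""
--     pairs = []
--     for us in us_data:
--         settore = us.get('settore', 'Unknown')
--         if settore:
--             pairs.append((f"Settore {settore}",
--                           f"{us.get('sito', '')}_{us.get('area', '')}_{us.get('us', '')}"))
--     return {k: [v for kk, v in pairs if kk == k]
--             for k in dict.fromkeys(k for k, _ in pairs)}
-- ===== Notes on version B (the rewrite author's own statement) =====
-- stated objective: alternative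
-- what changed: Replaces the single defaultdict hash pass with materialize-pairs, ordered key dedup, then a per-key scan that assembles each group's list in one comprehension.
import Mathlib
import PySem

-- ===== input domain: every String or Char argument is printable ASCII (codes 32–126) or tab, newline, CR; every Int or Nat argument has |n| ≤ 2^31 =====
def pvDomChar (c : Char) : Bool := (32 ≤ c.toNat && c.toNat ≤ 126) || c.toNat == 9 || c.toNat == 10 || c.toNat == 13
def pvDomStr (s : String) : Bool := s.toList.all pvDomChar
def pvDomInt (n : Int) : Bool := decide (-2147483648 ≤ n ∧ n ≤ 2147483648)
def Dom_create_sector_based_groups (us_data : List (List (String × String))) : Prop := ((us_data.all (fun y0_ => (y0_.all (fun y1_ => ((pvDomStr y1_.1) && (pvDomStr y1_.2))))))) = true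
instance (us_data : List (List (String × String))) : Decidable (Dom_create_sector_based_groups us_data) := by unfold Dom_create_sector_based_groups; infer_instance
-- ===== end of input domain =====

-- B replaces A's single defaultdict pass by materialize-pairs + ordered key dedup + per-key scans; alternative decomposition, same results.


-- ===== PORT A =====
-- us.get(k, dflt) on the record dict (first match, per the assoc-list convention)
def pvGetS (us : List (String × String)) (k dflt : String) : String :=
  (PySem.Dict.mk us).getD k dflt

def pvUsId (us : List (String × String)) : String :=
  pvGetS us "sito" "" ++ "_" ++ pvGetS us "area" "" ++ "_" ++ pvGetS us "us" ""

def create_sector_based_groups (us_data : List (List (String × String))) : List (String × List String) :=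
  let sector_groups : PySem.Dict String (List String) :=
    us_data.foldl (fun d us =>
      let settore := pvGetS us "settore" "Unknown"
      if settore ≠ "" then
        -- defaultdict(list): sector_groups[key].append(us_id)
        d.modify ("Settore " ++ settore) [] (· ++ [pvUsId us])
      else d) PySem.Dict.empty
  sector_groups.items

-- ===== PORT B =====
def create_sector_based_groups_alt (us_data : List (List (String × String))) : List (String × List String) :=
  let pairs : List (String × String) :=
    us_data.foldl (fun acc us =>
      let settore := pvGetS us "settore" "Unknown"
      if settore ≠ "" then acc ++ [("Settore " ++ settore, pvUsId us)] else acc) []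
  let keys := PySem.List.dedup (pairs.map (·.1))
  keys.map (fun k => (k, (pairs.filter (fun p => p.1 == k)).map (·.2)))

-- ===== PRECONDITION & SPEC =====
def Spec_create_sector_based_groups (us_data : List (List (String × String))) (out : List (String × List String)) : Prop := out = create_sector_based_groups_alt us_data
instance (us_data : List (List (String × String))) (out : List (String × List String)) : Decidable (Spec_create_sector_based_groups us_data out) := by unfold Spec_create_sector_based_groups; infer_instance

-- ===== CLAIM (what is proved, stated in full; the proofs are below) =====
def Claim_equal_create_sector_based_groups : Prop := ∀ (us_data : List (List (String × String))), Dom_create_sector_based_groups us_data → Spec_create_sector_based_groups us_data (create_sector_based_groups us_data)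

-- ===== LEMMAS AND PROOFS =====

-- the (key, us_id) pairs B materializes, as a filter+map
def pvPairs (us_data : List (List (String × String))) : List (String × String) :=
  (us_data.filter (fun us => pvGetS us "settore" "Unknown" ≠ "")).map
    (fun us => ("Settore " ++ pvGetS us "settore" "Unknown", pvUsId us))

lemma pvPairs_cons (us : List (String × String)) (rest : List (List (String × String))) :
    pvPairs (us :: rest)
    = (if pvGetS us "settore" "Unknown" ≠ "" then
        [("Settore " ++ pvGetS us "settore" "Unknown", pvUsId us)] else []) ++ pvPairs rest := by
  by_cases h : pvGetS us "settore" "Unknown" = "" <;> simp [pvPairs, h]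

lemma pvPairs_fold (us_data : List (List (String × String))) (acc : List (String × String)) :
    us_data.foldl (fun acc us =>
      let settore := pvGetS us "settore" "Unknown"
      if settore ≠ "" then acc ++ [("Settore " ++ settore, pvUsId us)] else acc) acc
    = acc ++ pvPairs us_data := by
  induction us_data generalizing acc with
  | nil => simp [pvPairs]
  | cons us rest ih =>
    rw [List.foldl_cons, ih, pvPairs_cons]
    by_cases h : pvGetS us "settore" "Unknown" = "" <;> simp [h]

lemma pvFoldA_eq (us_data : List (List (String × String))) (d : PySem.Dict String (List String)) :
    us_data.foldl (fun d us =>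
      let settore := pvGetS us "settore" "Unknown"
      if settore ≠ "" then
        d.modify ("Settore " ++ settore) [] (· ++ [pvUsId us])
      else d) d
    = (pvPairs us_data).foldl (fun d p => d.modify p.1 [] (· ++ [p.2])) d := by
  induction us_data generalizing d with
  | nil => simp [pvPairs]
  | cons us rest ih =>
    rw [List.foldl_cons, ih, pvPairs_cons]
    by_cases h : pvGetS us "settore" "Unknown" = "" <;> simp [h]

theorem create_sector_based_groups_spec : Claim_equal_create_sector_based_groups := by
  intro us_data _
  show create_sector_based_groups us_data = create_sector_based_groups_alt us_data
  unfold create_sector_based_groups create_sector_based_groups_alt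
  rw [pvFoldA_eq, pvPairs_fold]
  simp only [List.nil_append]
  set l := pvPairs us_data with hl
  have hnodup : ((l.foldl (fun d p => d.modify p.1 [] (· ++ [p.2])) PySem.Dict.empty)).keys.Nodup := by
    exact PySem.Dict.nodup_keys_foldl_modify_key l (fun p : String × String => p.1)
      [] (fun _ p v => v ++ [p.2]) PySem.Dict.empty (by simp)
  rw [PySem.Dict.items_eq_map_keys _ hnodup []]
  have hkeys : ((l.foldl (fun d p => d.modify p.1 [] (· ++ [p.2])) PySem.Dict.empty)).keys
      = PySem.List.dedup (l.map (·.1)) := by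
    have h1 := PySem.Dict.keys_foldl_modify_key l (fun p : String × String => p.1)
      [] (fun _ p v => v ++ [p.2]) PySem.Dict.empty
    rw [PySem.List.dedup_eq_ofList, PySem.Set.ofList_eq_foldl]
    simpa [PySem.Set.update] using h1
  rw [hkeys]
  apply List.map_congr_left
  intro k _
  congr 1
  simpa using PySem.Dict.getD_foldl_modify_append l PySem.Dict.empty k
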